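-- pv_equiv track=rewrite | github.com/u-joy-happy/codetree | 250522/함수를 이용한 온전수 판별/determining-the-whole-number-using-a-function.py | get_num_of_perfnum
-- ===== SOURCE A (Python) =====
-- def get_num_of_perfnum(a, b) :
--     cnt = 0
--     for i in range(a, b+1) :
--         if i % 2 == 0 :
--             continue
--         elif i % 10 == 5 :
--             continue
--         elif i % 3 == 0 and i % 9 != 0 :
--             continue
--         cnt += 1
--     return cnt
-- ===== SOURCE B (Python) =====
-- # Period-90 closed form: the filter depends only on i mod 90 (lcm of 2, 10, 9).
-- _OK = tuple(1 if (r % 2 != 0 and r % 10 != 5 and not (r % 3 == 0 and r % 9 != 0)) else 0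
--             for r in range(90))
-- _PRE = [0]
-- for _v in _OK:
--     _PRE.append(_PRE[-1] + _v)
--
-- def _count_below(n):
--     """number of passing integers in [0, n) (works for negative n too)."""
--     q, r = divmod(n, 90)
--     return q * _PRE[90] + _PRE[r]
--
-- def get_num_of_perfnum(a, b):
--     if b < a:
--         return 0
--     return _count_below(b + 1) - _count_below(a)
-- ===== Notes on version B (the rewrite author's own statement) =====
-- stated objective: faster
-- what changed: Replaces A's per-element scan of range(a, b+1) with an O(1) closed form: the filter is periodic with period 90 (lcm of 2, 10, 9), so B uses a precomputed 91-entry prefix-sum table and floor-division to count whole periods plus the remainder.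
import Mathlib
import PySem

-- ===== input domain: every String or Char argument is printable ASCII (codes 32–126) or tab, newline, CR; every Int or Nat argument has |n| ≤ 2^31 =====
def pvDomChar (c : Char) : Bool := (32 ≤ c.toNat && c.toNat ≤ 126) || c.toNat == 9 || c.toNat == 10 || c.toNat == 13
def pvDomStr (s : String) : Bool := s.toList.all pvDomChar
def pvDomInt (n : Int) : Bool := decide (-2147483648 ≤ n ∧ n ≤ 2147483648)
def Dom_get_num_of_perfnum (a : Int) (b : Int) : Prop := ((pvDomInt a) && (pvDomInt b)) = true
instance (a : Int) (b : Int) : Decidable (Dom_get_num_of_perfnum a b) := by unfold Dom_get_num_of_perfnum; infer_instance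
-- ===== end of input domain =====

-- B replaces A's per-element scan of [a, b] by an O(1) period-90 closed form
-- (the filter depends only on i mod 90): prefix-sum table + quotient arithmetic.

-- ===== PORT A =====
def get_num_of_perfnum (a : Int) (b : Int) : Int :=
  (PySem.List.pyRange a (b + 1) 1).foldl (fun cnt i =>
    if PySem.Int.mod i 2 = 0 then cnt
    else if PySem.Int.mod i 10 = 5 then cnt
    else if PySem.Int.mod i 3 = 0 ∧ PySem.Int.mod i 9 ≠ 0 then cnt
    else cnt + 1) 0

-- ===== PORT B =====
-- _OK: indicator of the filter on one period [0, 90)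
def pvOK : List Int :=
  (PySem.List.pyRange 0 90 1).map (fun r =>
    if PySem.Int.mod r 2 ≠ 0 ∧ PySem.Int.mod r 10 ≠ 5 ∧
       ¬ (PySem.Int.mod r 3 = 0 ∧ PySem.Int.mod r 9 ≠ 0) then (1 : Int) else 0)

-- _PRE: prefix sums of pvOK (length 91), built by the same append loop as Source B
def pvPRE : List Int :=
  pvOK.foldl (fun acc v => acc ++ [acc.getLast?.getD 0 + v]) [0]

-- _count_below(n): number of passing integers in [0, n)
def pvCountBelow (n : Int) : Int :=
  PySem.Int.floordiv n 90 * PySem.List.pyGetD pvPRE 90 0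
    + PySem.List.pyGetD pvPRE (PySem.Int.mod n 90) 0

def get_num_of_perfnum_alt (a : Int) (b : Int) : Int :=
  if b < a then 0 else pvCountBelow (b + 1) - pvCountBelow a

-- ===== PRECONDITION & SPEC =====
def Spec_get_num_of_perfnum (a : Int) (b : Int) (out : Int) : Prop := out = get_num_of_perfnum_alt a b
instance (a : Int) (b : Int) (out : Int) : Decidable (Spec_get_num_of_perfnum a b out) := by unfold Spec_get_num_of_perfnum; infer_instance

-- ===== CLAIM (what is proved, stated in full; the proofs are below) =====
def Claim_equal_get_num_of_perfnum : Prop := ∀ (a : Int) (b : Int), Dom_get_num_of_perfnum a b → Spec_get_num_of_perfnum a b (get_num_of_perfnum a b)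

-- ===== LEMMAS AND PROOFS =====

/-- Indicator of A's filter (1 when A's loop increments `cnt`). -/
def pvInd (i : Int) : Int :=
  if PySem.Int.mod i 2 = 0 then 0
  else if PySem.Int.mod i 10 = 5 then 0
  else if PySem.Int.mod i 3 = 0 ∧ PySem.Int.mod i 9 ≠ 0 then 0
  else 1

lemma pvStep_eq (c i : Int) :
    (if PySem.Int.mod i 2 = 0 then c
     else if PySem.Int.mod i 10 = 5 then c
     else if PySem.Int.mod i 3 = 0 ∧ PySem.Int.mod i 9 ≠ 0 then c
     else c + 1) = c + pvInd i := by
  unfold pvInd; split_ifs <;> omega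

lemma pvInd_mod (m : Int) : pvInd m = pvInd (m % 90) := by
  unfold pvInd
  simp only [PySem.Int.mod_eq_emod_of_pos (show (0:Int) < 2 by norm_num),
      PySem.Int.mod_eq_emod_of_pos (show (0:Int) < 10 by norm_num),
      PySem.Int.mod_eq_emod_of_pos (show (0:Int) < 3 by norm_num),
      PySem.Int.mod_eq_emod_of_pos (show (0:Int) < 9 by norm_num)]
  rw [Int.emod_emod_of_dvd m (by norm_num : (2:Int) ∣ 90),
      Int.emod_emod_of_dvd m (by norm_num : (10:Int) ∣ 90),
      Int.emod_emod_of_dvd m (by norm_num : (3:Int) ∣ 90),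
      Int.emod_emod_of_dvd m (by norm_num : (9:Int) ∣ 90)]

-- Table step on one period, checked by computation.
set_option maxRecDepth 20000 in
set_option maxHeartbeats 1000000 in
lemma pvTable_step : ∀ k : Fin 89,
    PySem.List.pyGetD pvPRE ((k : Nat) + 1 : Int) 0
      = PySem.List.pyGetD pvPRE ((k : Nat) : Int) 0 + pvInd ((k : Nat) : Int) := by
  decide

set_option maxRecDepth 20000 in
lemma pvTable_wrap :
    PySem.List.pyGetD pvPRE 90 0 + PySem.List.pyGetD pvPRE 0 0
      = PySem.List.pyGetD pvPRE 89 0 + pvInd 89 := by decide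

lemma pvCountBelow_succ (m : Int) : pvCountBelow (m + 1) = pvCountBelow m + pvInd m := by
  unfold pvCountBelow
  simp only [PySem.Int.floordiv_eq_ediv_of_pos (show (0:Int) < 90 by norm_num),
      PySem.Int.mod_eq_emod_of_pos (show (0:Int) < 90 by norm_num)]
  have h1 : 90 * (m / 90) + m % 90 = m := Int.ediv_add_emod m 90
  have h2 : 90 * ((m + 1) / 90) + (m + 1) % 90 = m + 1 := Int.ediv_add_emod (m + 1) 90
  have hr1 : 0 ≤ m % 90 := Int.emod_nonneg m (by norm_num)
  have hr2 : m % 90 < 90 := Int.emod_lt_of_pos m (by norm_num)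
  have hr3 : 0 ≤ (m + 1) % 90 := Int.emod_nonneg (m + 1) (by norm_num)
  have hr4 : (m + 1) % 90 < 90 := Int.emod_lt_of_pos (m + 1) (by norm_num)
  rw [pvInd_mod m]
  by_cases hc : m % 90 = 89
  · have hq : (m + 1) / 90 = m / 90 + 1 := by omega
    have hm : (m + 1) % 90 = 0 := by omega
    rw [hq, hm, hc]
    have := pvTable_wrap
    ring_nf
    omega
  · have hq : (m + 1) / 90 = m / 90 := by omega
    have hm : (m + 1) % 90 = m % 90 + 1 := by omega
    rw [hq, hm]
    have hk : (m % 90).toNat < 89 := by omega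
    have := pvTable_step ⟨(m % 90).toNat, hk⟩
    simp only at this
    have hcast : ((m % 90).toNat : Int) = m % 90 := Int.toNat_of_nonneg hr1
    rw [hcast] at this
    omega

lemma pvLoop (n : Nat) : ∀ (a c : Int),
    (PySem.List.pyRange a (a + n) 1).foldl (fun cnt i =>
      if PySem.Int.mod i 2 = 0 then cnt
      else if PySem.Int.mod i 10 = 5 then cnt
      else if PySem.Int.mod i 3 = 0 ∧ PySem.Int.mod i 9 ≠ 0 then cnt
      else cnt + 1) c = c + pvCountBelow (a + n) - pvCountBelow a := by
  induction n with
  | zero =>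
    intro a c
    rw [PySem.List.pyRange_one_eq_nil (by omega)]
    simp
  | succ n ih =>
    intro a c
    have hsplit : a + ((n : Int) + 1) = (a + n) + 1 := by ring
    rw [show ((n + 1 : Nat) : Int) = (n : Int) + 1 by push_cast; ring, hsplit,
        PySem.List.pyRange_one_succ_right (by omega)]
    rw [List.foldl_append, ih a c]
    simp only [List.foldl_cons, List.foldl_nil]
    rw [pvStep_eq, pvCountBelow_succ]
    ring

-- ===== VERDICT (by name: the statement is the Claim_ definition above) =====
theorem get_num_of_perfnum_spec : Claim_equal_get_num_of_perfnum := by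
  intro a b _
  unfold Spec_get_num_of_perfnum get_num_of_perfnum get_num_of_perfnum_alt
  by_cases h : b < a
  · rw [PySem.List.pyRange_one_eq_nil (by omega)]
    simp [h]
  · have hn : a + ((b + 1 - a).toNat : Int) = b + 1 := by omega
    have := pvLoop (b + 1 - a).toNat a 0
    rw [hn] at this
    rw [this]
    simp [h]
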